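-- pv_equiv track=rewrite | github.com/yunsoft2019/Lever-Plus | scripts/fix_rl_candidate_pool_k64_v2.py | select_icds_to_remove
-- ===== SOURCE A (Python) =====
-- from collections import defaultdict
--
-- def select_icds_to_remove(original_pool, in_pool_trajectories, num_to_remove):
--     """
--     选择要从候选池中移除的ICD
--
--     策略：优先移除未被任何in_pool轨迹使用的ICD
--     """
--     pool_set = set(original_pool)
--
--     # 统计每个ICD被使用的次数
--     usage_count = defaultdict(int)
--     for traj in in_pool_trajectories:
--         for idx in traj.get('pointer', [])[:2]:
--             if idx in pool_set:
--                 usage_count[idx] += 1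
--
--     # 按使用次数排序（少的优先移除）
--     candidates = [(idx, usage_count.get(idx, 0)) for idx in original_pool]
--     candidates.sort(key=lambda x: x[1])
--
--     return [idx for idx, _ in candidates[:num_to_remove]]
-- ===== SOURCE B (Python) =====
-- def select_icds_to_remove(original_pool, in_pool_trajectories, num_to_remove):
--     """
--     选择要从候选池中移除的ICD（稳定多遍计数法：无比较排序，无桶字典）
--     """
--     pool_set = set(original_pool)
--
--     # 展平所有轨迹的前两个 pointer，并只保留池内的 ICD
--     stream = [idx for traj in in_pool_trajectories
--                   for idx in traj.get('pointer', [])[:2]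
--                   if idx in pool_set]
--
--     # 一遍统计
--     usage = {}
--     for idx in stream:
--         usage[idx] = usage.get(idx, 0) + 1
--
--     # 按计数 0..maxc 逐遍输出池中元素（稳定：同计数保持原顺序）
--     counts = [usage.get(idx, 0) for idx in original_pool]
--     maxc = max(counts, default=-1)
--     out = []
--     for c in range(maxc + 1):
--         out.extend(idx for idx, k in zip(original_pool, counts) if k == c)
--     return out[:num_to_remove]
-- ===== Notes on version B (the rewrite author's own statement) =====
-- stated objective: alternative
-- what changed: Replaces A's comparison sort of (icd, count) pairs by a stable multi-pass pigeonhole emission: the pointer stream is flattened and filtered once, counted in one pass, and the pool is emitted count-by-count for c = 0..maxcount, so no sort is performed.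
import Mathlib
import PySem

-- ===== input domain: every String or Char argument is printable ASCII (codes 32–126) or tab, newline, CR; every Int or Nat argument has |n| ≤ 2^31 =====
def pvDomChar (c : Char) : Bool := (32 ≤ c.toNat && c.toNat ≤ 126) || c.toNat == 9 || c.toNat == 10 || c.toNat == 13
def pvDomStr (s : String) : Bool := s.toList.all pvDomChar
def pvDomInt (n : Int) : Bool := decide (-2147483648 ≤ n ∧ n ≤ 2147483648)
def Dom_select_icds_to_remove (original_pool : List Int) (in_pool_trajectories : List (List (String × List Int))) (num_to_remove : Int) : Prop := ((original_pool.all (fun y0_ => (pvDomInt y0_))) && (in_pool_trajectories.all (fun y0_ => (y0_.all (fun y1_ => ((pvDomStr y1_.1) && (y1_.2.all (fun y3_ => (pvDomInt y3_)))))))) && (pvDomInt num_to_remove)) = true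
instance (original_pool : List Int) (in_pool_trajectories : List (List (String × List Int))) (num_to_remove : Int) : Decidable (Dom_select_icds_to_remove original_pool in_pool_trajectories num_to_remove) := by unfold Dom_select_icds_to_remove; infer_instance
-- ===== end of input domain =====

-- B replaces A's comparison sort of (icd, count) pairs by a stable multi-pass
-- pigeonhole emission (flatten+filter+count once, then emit the pool for each
-- count c = 0..maxcount); return values proved equal on the whole domain.

-- ===== PORT A =====
-- A: literal transliteration of the Python (defaultdict counting over nested loops,
-- comparison sort by count, slice).
def select_icds_to_remove (original_pool : List Int) (in_pool_trajectories : List (List (String × List Int))) (num_to_remove : Int) : List Int :=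
  let pool_set : PySem.Set Int := PySem.Set.ofList original_pool
  let usage_count : PySem.Dict Int Int :=
    in_pool_trajectories.foldl (fun d traj =>
      (PySem.List.slice ((PySem.Dict.mk traj).getD "pointer" []) none (some 2)).foldl
        (fun d idx => if PySem.Set.contains pool_set idx then d.modify idx 0 (· + 1) else d) d)
      PySem.Dict.empty
  let candidates : List (Int × Int) := original_pool.map (fun idx => (idx, usage_count.getD idx 0))
  let sortedc := PySem.List.sorted candidates (fun x => x.2) false
  (PySem.List.slice sortedc none (some num_to_remove)).map (fun p => p.1)

-- ===== PORT B =====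
-- B: flatten-and-filter the pointer stream once, one counting pass over it,
-- then for c = 0..maxc emit the pool elements whose count is c (zip with counts).
def select_icds_to_remove_alt (original_pool : List Int) (in_pool_trajectories : List (List (String × List Int))) (num_to_remove : Int) : List Int :=
  let pool_set : PySem.Set Int := PySem.Set.ofList original_pool
  let stream : List Int :=
    (in_pool_trajectories.flatMap (fun traj =>
      PySem.List.slice ((PySem.Dict.mk traj).getD "pointer" []) none (some 2))).filter
      (fun idx => PySem.Set.contains pool_set idx)
  let usage : PySem.Dict Int Int :=
    stream.foldl (fun d idx => d.insert idx (d.getD idx 0 + 1)) PySem.Dict.empty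
  let counts : List Int := original_pool.map (fun idx => usage.getD idx 0)
  let maxc : Int := (PySem.List.max? counts (fun x => x)).getD (-1)
  let out : List Int :=
    (PySem.List.pyRange 0 (maxc + 1) 1).foldl
      (fun acc c => acc ++ ((original_pool.zip counts).filter (fun p => p.2 == c)).map (fun p => p.1)) []
  PySem.List.slice out none (some num_to_remove)

-- ===== PRECONDITION & SPEC =====
def Spec_select_icds_to_remove (original_pool : List Int) (in_pool_trajectories : List (List (String × List Int))) (num_to_remove : Int) (out : List Int) : Prop := out = select_icds_to_remove_alt original_pool in_pool_trajectories num_to_remove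
instance (original_pool : List Int) (in_pool_trajectories : List (List (String × List Int))) (num_to_remove : Int) (out : List Int) : Decidable (Spec_select_icds_to_remove original_pool in_pool_trajectories num_to_remove out) := by unfold Spec_select_icds_to_remove; infer_instance

-- ===== CLAIM (what is proved, stated in full; the proofs are below) =====
def Claim_equal_select_icds_to_remove : Prop := ∀ (original_pool : List Int) (in_pool_trajectories : List (List (String × List Int))) (num_to_remove : Int), Dom_select_icds_to_remove original_pool in_pool_trajectories num_to_remove → Spec_select_icds_to_remove original_pool in_pool_trajectories num_to_remove (select_icds_to_remove original_pool in_pool_trajectories num_to_remove)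

-- ===== LEMMAS AND PROOFS =====

theorem pvInsertBy_cons {α : Type} (before : α → α → Bool) (x y : α) (ys : List α) :
    PySem.List.insertBy before x (y :: ys) =
      if before x y then x :: y :: ys else y :: PySem.List.insertBy before x ys := rfl

theorem pvInsertBy_append_left {α : Type} (before : α → α → Bool) (x : α) (P S : List α)
    (h : ∀ a ∈ P, before x a = false) :
    PySem.List.insertBy before x (P ++ S) = P ++ PySem.List.insertBy before x S := by
  induction P with
  | nil => simp
  | cons p P ih =>
    have hp : before x p = false := h p (by simp)
    simp [pvInsertBy_cons, hp, ih (fun a ha => h a (by simp [ha]))]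

theorem pvInsertBy_all_before {α : Type} (before : α → α → Bool) (x : α) (S : List α)
    (h : ∀ a ∈ S, before x a = true) :
    PySem.List.insertBy before x S = x :: S := by
  cases S with
  | nil => rfl
  | cons a S => simp [pvInsertBy_cons, h a (by simp)]

theorem pvInsertBy_map {α β : Type} (f : α → β) (bf : β → β → Bool) (x : α) (acc : List α) :
    PySem.List.insertBy bf (f x) (acc.map f) =
      (PySem.List.insertBy (fun a c => bf (f a) (f c)) x acc).map f := by
  induction acc with
  | nil => rfl
  | cons a acc ih =>
    simp only [List.map_cons, pvInsertBy_cons]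
    by_cases hb : bf (f x) (f a) = true
    · simp [hb]
    · simp only [Bool.not_eq_true] at hb
      simp [hb, ih]

theorem pvSorted_map {α β κ : Type} [LinearOrder κ] (f : α → β) (key : β → κ) (l : List α) :
    PySem.List.sorted (l.map f) key false =
      (PySem.List.sorted l (fun a => key (f a)) false).map f := by
  rw [PySem.List.sorted_eq_foldl_insertBy, PySem.List.sorted_eq_foldl_insertBy, List.foldl_map]
  suffices h : ∀ (acc : List α),
      l.foldl (fun acc x => PySem.List.insertBy (fun a b => decide (key a < key b)) (f x) acc) (acc.map f)
        = (l.foldl (fun acc x => PySem.List.insertBy (fun a b => decide (key (f a) < key (f b))) x acc) acc).map f by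
    simpa using h []
  induction l with
  | nil => intro acc; rfl
  | cons x l ih =>
    intro acc
    simp only [List.foldl_cons]
    rw [pvInsertBy_map, ih]

theorem pvSorted_eq_buckets (pool : List Int) (k : Int → Int) (N : Int)
    (h : ∀ i ∈ pool, 0 ≤ k i ∧ k i < N) :
    PySem.List.sorted pool k false =
      (PySem.List.pyRange 0 N 1).flatMap (fun c => pool.filter (fun i => k i == c)) := by
  induction pool using List.reverseRecOn with
  | nil => simp [PySem.List.sorted_eq_foldl_insertBy]
  | append_singleton ys x ih =>
    have hx := h x (by simp)
    have hys : ∀ i ∈ ys, 0 ≤ k i ∧ k i < N := fun i hi => h i (by simp [hi])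
    rw [PySem.List.sorted_eq_foldl_insertBy, List.foldl_append, List.foldl_cons, List.foldl_nil,
      ← PySem.List.sorted_eq_foldl_insertBy, ih hys]
    have hsplit1 : PySem.List.pyRange 0 N 1 = PySem.List.pyRange 0 (k x + 1) 1 ++ PySem.List.pyRange (k x + 1) N 1 :=
      PySem.List.pyRange_one_append 0 (k x + 1) N (by omega) (by omega)
    have hsplit2 : PySem.List.pyRange 0 (k x + 1) 1 = PySem.List.pyRange 0 (k x) 1 ++ [k x] :=
      PySem.List.pyRange_one_succ_right (by omega)
    have hflo : ∀ c : Int, c ≠ k x →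
        (ys ++ [x]).filter (fun i => k i == c) = ys.filter (fun i => k i == c) := by
      intro c hc
      rw [List.filter_append]
      have hfx : (k x == c) = false := beq_eq_false_iff_ne.mpr (fun hh => hc hh.symm)
      simp [List.filter, hfx]
    have hlo : (PySem.List.pyRange 0 (k x) 1).flatMap (fun c => (ys ++ [x]).filter (fun i => k i == c))
        = (PySem.List.pyRange 0 (k x) 1).flatMap (fun c => ys.filter (fun i => k i == c)) := by
      apply List.flatMap_congr
      intro c hc
      have := (PySem.List.mem_pyRange_one).1 hc
      exact hflo c (by omega)
    have hhi : (PySem.List.pyRange (k x + 1) N 1).flatMap (fun c => (ys ++ [x]).filter (fun i => k i == c))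
        = (PySem.List.pyRange (k x + 1) N 1).flatMap (fun c => ys.filter (fun i => k i == c)) := by
      apply List.flatMap_congr
      intro c hc
      have := (PySem.List.mem_pyRange_one).1 hc
      exact hflo c (by omega)
    have hmid : (ys ++ [x]).filter (fun i => k i == k x) = ys.filter (fun i => k i == k x) ++ [x] := by
      rw [List.filter_append]; simp [List.filter]
    rw [hsplit1, hsplit2]
    simp only [List.flatMap_append, List.flatMap_cons, List.flatMap_nil, List.append_nil]
    rw [hlo, hhi, hmid]
    set bf : Int → Int → Bool := fun a b => decide (k a < k b) with hbf
    have hP : ∀ a ∈ (PySem.List.pyRange 0 (k x) 1).flatMap (fun c => ys.filter (fun i => k i == c))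
        ++ ys.filter (fun i => k i == k x), bf x a = false := by
      intro a ha
      rcases List.mem_append.1 ha with ha | ha
      · rcases List.mem_flatMap.1 ha with ⟨c, hc, hac⟩
        have hcr := (PySem.List.mem_pyRange_one).1 hc
        have : k a = c := by simpa using (List.mem_filter.1 hac).2
        simp [hbf]; omega
      · have : k a = k x := by simpa using (List.mem_filter.1 ha).2
        simp [hbf]; omega
    have hS : ∀ a ∈ (PySem.List.pyRange (k x + 1) N 1).flatMap (fun c => ys.filter (fun i => k i == c)),
        bf x a = true := by
      intro a ha
      rcases List.mem_flatMap.1 ha with ⟨c, hc, hac⟩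
      have hcr := (PySem.List.mem_pyRange_one).1 hc
      have : k a = c := by simpa using (List.mem_filter.1 hac).2
      simp [hbf]; omega
    rw [show ((PySem.List.pyRange 0 (k x) 1).flatMap (fun c => List.filter (fun i => k i == c) ys)
          ++ List.filter (fun i => k i == k x) ys)
          ++ (PySem.List.pyRange (k x + 1) N 1).flatMap (fun c => List.filter (fun i => k i == c) ys)
        = ((PySem.List.pyRange 0 (k x) 1).flatMap (fun c => List.filter (fun i => k i == c) ys)
          ++ List.filter (fun i => k i == k x) ys)
          ++ (PySem.List.pyRange (k x + 1) N 1).flatMap (fun c => List.filter (fun i => k i == c) ys) from rfl,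
      pvInsertBy_append_left bf x _ _ hP,
      pvInsertBy_all_before bf x _ hS]
    simp

theorem pvMap_slice_to {α β : Type} (f : α → β) (xs : List α) (b : Int) :
    (PySem.List.slice xs none (some b)).map f = PySem.List.slice (xs.map f) none (some b) := by
  simp [PySem.List.slice, List.map_take]

-- A's counting pass computes the count of v in the filtered flattened pointer stream
theorem pvCount_modify (trajs : List (List (String × List Int))) (p : Int → Bool) (v : Int) :
    (trajs.foldl (fun d traj =>
        (PySem.List.slice ((PySem.Dict.mk traj).getD "pointer" []) none (some 2)).foldl
          (fun d idx => if p idx then d.modify idx 0 (· + 1) else d) d)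
      PySem.Dict.empty).getD v 0
    = (((trajs.flatMap (fun traj => PySem.List.slice ((PySem.Dict.mk traj).getD "pointer" []) none (some 2))).filter p).count v : Int) := by
  rw [← List.foldl_flatMap]
  rw [PySem.List.foldl_if_eq_foldl_filter p (fun d idx => PySem.Dict.modify d idx 0 (· + 1))]
  rw [PySem.Dict.getD_foldl_modify_add_one]
  simp

-- B's counting pass over the already-filtered stream computes the same count
theorem pvCount_insert (stream : List Int) (v : Int) :
    (stream.foldl (fun d idx => d.insert idx (d.getD idx 0 + 1)) PySem.Dict.empty).getD v 0
    = (stream.count v : Int) := by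
  rw [PySem.Dict.getD_foldl_insert_add_one]
  simp

theorem pvZip_map_self {α β : Type} (l : List α) (f : α → β) :
    l.zip (l.map f) = l.map (fun x => (x, f x)) := by
  induction l with
  | nil => rfl
  | cons a l ih => simp [ih]

-- core: map-fst of the stable sort by count = pool emitted count-by-count for c = 0..maxc
theorem pvCore (pool : List Int) (k : Int → Int) (hk : ∀ i, 0 ≤ k i) :
    (PySem.List.sorted (pool.map fun idx => (idx, k idx)) (fun x => x.2) false).map (fun p => p.1)
    = (PySem.List.pyRange 0 (((PySem.List.max? (pool.map k) (fun x => x)).getD (-1)) + 1) 1).foldl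
        (fun acc c => acc ++ ((pool.zip (pool.map k)).filter (fun p => p.2 == c)).map (fun p => p.1)) [] := by
  set M := (PySem.List.max? (pool.map k) (fun x => x)).getD (-1) with hM
  rw [PySem.List.foldl_append_eq_flatMap]
  have hbound : ∀ i ∈ pool, 0 ≤ k i ∧ k i < M + 1 := by
    intro i hi
    refine ⟨hk i, ?_⟩
    have hmem : k i ∈ pool.map k := List.mem_map_of_mem hi
    obtain ⟨m, hm⟩ : ∃ m, PySem.List.max? (pool.map k) (fun x => x) = some m := by
      cases hcase : PySem.List.max? (pool.map k) (fun x => x) with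
      | none =>
        rw [PySem.List.max?_eq_none_iff] at hcase
        rw [hcase] at hmem; simp at hmem
      | some m => exact ⟨m, rfl⟩
    have hle := PySem.List.max?_isMax hm (k i) hmem
    rw [hM, hm]; simp only [Option.getD_some]; omega
  rw [pvSorted_map, pvSorted_eq_buckets pool k (M + 1) hbound, pvZip_map_self]
  simp only [List.map_flatMap, List.filter_map, List.map_map]
  apply List.flatMap_congr
  intro c _
  simp [Function.comp_def]

-- ===== VERDICT (by name: the statement is the Claim_ definition above) =====
theorem select_icds_to_remove_spec : Claim_equal_select_icds_to_remove := by
  intro pool trajs n _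
  unfold Spec_select_icds_to_remove select_icds_to_remove select_icds_to_remove_alt
  simp only [pvCount_modify, pvCount_insert]
  rw [pvMap_slice_to]
  congr 1
  exact pvCore pool _ (fun i => Int.natCast_nonneg _)
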